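-- pv_equiv track=rewrite | github.com/open-contracting/nightingale | nightingale/mapping/v1/config.py | enforce_mapping_structure
-- ===== SOURCE A (Python) =====
-- def enforce_mapping_structure(mappings):
--     sections = {"planning": [], "tender": [], "awards": [], "contracts": [], "implementation": [], "general": []}
--     for mapping in mappings:
--         section = mapping["path"].split("/")[0]
--         if section in sections:
--             sections[section].append(mapping)
--         else:
--             sections["general"].append(mapping)
--     # Merge the lists in the specified order
--     return (
--         sections["general"]
--         + sections["planning"]
--         + sections["tender"]
--         + sections["awards"]
--         + sections["contracts"]
--         + sections["implementation"]
--     )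
-- ===== SOURCE B (Python) =====
-- def enforce_mapping_structure(mappings):
--     order = {"general": 0, "planning": 1, "tender": 2, "awards": 3, "contracts": 4, "implementation": 5}
--     return sorted(mappings, key=lambda m: order.get(m["path"].split("/")[0], 0))
-- ===== Notes on version B (the rewrite author's own statement) =====
-- stated objective: simpler
-- what changed: Replaced the six-bucket dict accumulation and manual concatenation with a single stable sort keyed by a section-priority map (unknown sections rank with 'general' at 0), relying on sort stability to preserve original order within each section.
import Mathlib
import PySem

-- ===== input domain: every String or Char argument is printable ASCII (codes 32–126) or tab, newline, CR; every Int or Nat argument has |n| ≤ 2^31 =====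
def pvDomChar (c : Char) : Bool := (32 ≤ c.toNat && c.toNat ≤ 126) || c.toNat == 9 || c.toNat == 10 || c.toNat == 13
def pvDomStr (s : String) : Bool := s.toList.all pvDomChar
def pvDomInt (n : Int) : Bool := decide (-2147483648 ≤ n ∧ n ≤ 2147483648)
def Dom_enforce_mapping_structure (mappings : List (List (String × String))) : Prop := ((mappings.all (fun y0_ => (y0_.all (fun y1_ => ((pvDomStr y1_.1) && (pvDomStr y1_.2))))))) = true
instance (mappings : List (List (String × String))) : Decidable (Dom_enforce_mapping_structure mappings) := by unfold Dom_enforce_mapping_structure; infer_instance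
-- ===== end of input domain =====

-- B replaces A's six-bucket accumulation + concatenation by one stable sort keyed by a
-- section-priority map (unknown sections rank 0, with "general"); same return value, no speed claim.

-- mapping["path"].split("/")[0] — shared by both ports (both Pythons compute exactly this);
-- the "path" lookup is dict access on an association list (first match), total under Pre_.
def pvPathSection (m : List (String × String)) : String :=
  PySem.List.pyGetD ((PySem.Str.split? ((List.lookup "path" m).getD "") "/").getD []) 0 ""

-- ===== PORT A =====
structure PvSections where
  general : List (List (String × String))
  planning : List (List (String × String))
  tender : List (List (String × String))
  awards : List (List (String × String))
  contracts : List (List (String × String))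
  implementation : List (List (String × String))

def pvStepA (s : PvSections) (m : List (String × String)) : PvSections :=
  let sec := pvPathSection m
  if sec = "planning" then { s with planning := s.planning ++ [m] }
  else if sec = "tender" then { s with tender := s.tender ++ [m] }
  else if sec = "awards" then { s with awards := s.awards ++ [m] }
  else if sec = "contracts" then { s with contracts := s.contracts ++ [m] }
  else if sec = "implementation" then { s with implementation := s.implementation ++ [m] }
  else { s with general := s.general ++ [m] }

def enforce_mapping_structure (mappings : List (List (String × String))) : List (List (String × String)) :=
  let s := mappings.foldl pvStepA ⟨[], [], [], [], [], []⟩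
  s.general ++ s.planning ++ s.tender ++ s.awards ++ s.contracts ++ s.implementation

-- ===== PORT B =====
def pvOrder : PySem.Dict String Int :=
  PySem.Dict.ofList [("general", 0), ("planning", 1), ("tender", 2), ("awards", 3), ("contracts", 4), ("implementation", 5)]

def pvRank (m : List (String × String)) : Int := pvOrder.getD (pvPathSection m) 0

def enforce_mapping_structure_alt (mappings : List (List (String × String))) : List (List (String × String)) :=
  PySem.List.sorted mappings pvRank false

-- ===== PRECONDITION & SPEC =====
-- Pre_ excludes exactly the inputs on which A raises KeyError: a mapping without a "path" key.
def Pre_enforce_mapping_structure (mappings : List (List (String × String))) : Prop :=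
  ∀ m ∈ mappings, (List.lookup "path" m).isSome = true
instance (mappings : List (List (String × String))) : Decidable (Pre_enforce_mapping_structure mappings) := by
  unfold Pre_enforce_mapping_structure; infer_instance

def pvWitness_enforce_mapping_structure : (List (List (String × String))) :=
  [[("path", "tender/items"), ("title", "t")], [("path", "other/x")], [("path", "planning/budget")]]

def Spec_enforce_mapping_structure (mappings : List (List (String × String))) (out : List (List (String × String))) : Prop := out = enforce_mapping_structure_alt mappings
instance (mappings : List (List (String × String))) (out : List (List (String × String))) : Decidable (Spec_enforce_mapping_structure mappings out) := by unfold Spec_enforce_mapping_structure; infer_instance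

-- ===== CLAIM (what is proved, stated in full; the proofs are below) =====
def Claim_equal_enforce_mapping_structure : Prop := ∀ (mappings : List (List (String × String))), Dom_enforce_mapping_structure mappings → Pre_enforce_mapping_structure mappings → Spec_enforce_mapping_structure mappings (enforce_mapping_structure mappings)

-- ===== LEMMAS AND PROOFS =====

def pvBucket (k : Int) (ms : List (List (String × String))) : List (List (String × String)) :=
  ms.filter (fun x => decide (pvRank x = k))

theorem pvOrder_getD (s : String) :
    pvOrder.getD s 0 = (if s = "planning" then 1 else if s = "tender" then 2 else if s = "awards" then 3
      else if s = "contracts" then 4 else if s = "implementation" then 5 else 0) := by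
  have h : pvOrder = PySem.Dict.mk [("general", 0), ("planning", 1), ("tender", 2), ("awards", 3), ("contracts", 4), ("implementation", 5)] := by decide
  rw [h, PySem.Dict.getD_eq_get?_getD]
  simp only [PySem.Dict.get?_mk_cons, beq_iff_eq]
  have hemp : (PySem.Dict.mk ([] : List (String × Int))).get? s = none := by simp [PySem.Dict.get?]
  rw [hemp]
  split_ifs <;> subst_vars <;> simp_all

theorem pvRank_eq (m : List (String × String)) :
    pvRank m = (if pvPathSection m = "planning" then 1 else if pvPathSection m = "tender" then 2
      else if pvPathSection m = "awards" then 3 else if pvPathSection m = "contracts" then 4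
      else if pvPathSection m = "implementation" then 5 else 0) := pvOrder_getD _

theorem pvRank_cases (m : List (String × String)) :
    pvRank m = 0 ∨ pvRank m = 1 ∨ pvRank m = 2 ∨ pvRank m = 3 ∨ pvRank m = 4 ∨ pvRank m = 5 := by
  rw [pvRank_eq]; split_ifs <;> simp

theorem pvBucket_cons (k : Int) (m : List (String × String)) (ms : List (List (String × String))) :
    pvBucket k (m :: ms) = (if pvRank m = k then m :: pvBucket k ms else pvBucket k ms) := by
  simp only [pvBucket, List.filter_cons]
  split_ifs with h1 h2 h2 <;> simp_all

theorem pvFoldA (ms : List (List (String × String))) (s : PvSections) :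
    ms.foldl pvStepA s =
      ⟨s.general ++ pvBucket 0 ms, s.planning ++ pvBucket 1 ms, s.tender ++ pvBucket 2 ms,
       s.awards ++ pvBucket 3 ms, s.contracts ++ pvBucket 4 ms, s.implementation ++ pvBucket 5 ms⟩ := by
  induction ms generalizing s with
  | nil => simp [pvBucket]
  | cons m ms ih =>
    simp only [List.foldl_cons, ih, pvStepA, pvBucket_cons]
    by_cases h1 : pvPathSection m = "planning" <;> by_cases h2 : pvPathSection m = "tender" <;>
      by_cases h3 : pvPathSection m = "awards" <;> by_cases h4 : pvPathSection m = "contracts" <;>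
      by_cases h5 : pvPathSection m = "implementation" <;>
      simp_all [pvRank_eq m, List.append_assoc]

theorem pvInsertMid {α : Type} (bf : α → α → Bool) (x : α) (ys zs : List α)
    (hy : ∀ y ∈ ys, bf x y = false) (hz : ∀ z ∈ zs, bf x z = true) :
    PySem.List.insertBy bf x (ys ++ zs) = ys ++ x :: zs := by
  induction ys with
  | nil =>
    cases zs with
    | nil => simp [PySem.List.insertBy]
    | cons z zs => simp [PySem.List.insertBy, hz z (by simp)]
  | cons y ys ih =>
    simp only [List.cons_append, PySem.List.insertBy, hy y (by simp), Bool.false_eq_true, if_false]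
    rw [ih (fun y' hy' => hy y' (by simp [hy']))]

theorem pvMemSnoc {B : List (List (String × String))} {m : List (String × String)} {j : Int}
    (hB : ∀ x ∈ B, pvRank x = j) (hm : pvRank m = j) : ∀ x ∈ B ++ [m], pvRank x = j := by
  intro x hx
  rcases List.mem_append.1 hx with h | h
  · exact hB x h
  · simp only [List.mem_singleton] at h; subst h; exact hm

theorem pvFoldB (ms : List (List (String × String))) (B0 B1 B2 B3 B4 B5 : List (List (String × String)))
    (h0 : ∀ x ∈ B0, pvRank x = 0) (h1 : ∀ x ∈ B1, pvRank x = 1) (h2 : ∀ x ∈ B2, pvRank x = 2)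
    (h3 : ∀ x ∈ B3, pvRank x = 3) (h4 : ∀ x ∈ B4, pvRank x = 4) (h5 : ∀ x ∈ B5, pvRank x = 5) :
    ms.foldl (fun acc x => PySem.List.insertBy (fun a b => decide (pvRank a < pvRank b)) x acc)
        (B0 ++ B1 ++ B2 ++ B3 ++ B4 ++ B5) =
      (B0 ++ pvBucket 0 ms) ++ (B1 ++ pvBucket 1 ms) ++ (B2 ++ pvBucket 2 ms) ++
        (B3 ++ pvBucket 3 ms) ++ (B4 ++ pvBucket 4 ms) ++ (B5 ++ pvBucket 5 ms) := by
  induction ms generalizing B0 B1 B2 B3 B4 B5 with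
  | nil => simp [pvBucket]
  | cons m ms ih =>
    simp only [List.foldl_cons, pvBucket_cons]
    rcases pvRank_cases m with hr | hr | hr | hr | hr | hr
    · have hins : PySem.List.insertBy (fun a b => decide (pvRank a < pvRank b)) m
          (B0 ++ B1 ++ B2 ++ B3 ++ B4 ++ B5) = (B0) ++ m :: (B1 ++ (B2 ++ (B3 ++ (B4 ++ (B5))))) := by
        rw [show B0 ++ B1 ++ B2 ++ B3 ++ B4 ++ B5 = (B0) ++ (B1 ++ (B2 ++ (B3 ++ (B4 ++ (B5))))) from by simp [List.append_assoc]]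
        refine pvInsertMid _ m _ _ (fun y hy => ?_) (fun z hz => ?_)
        · simp only [decide_eq_false_iff_not, not_lt, hr]
          have := h0 _ hy; omega
        · simp only [List.mem_append] at hz
          simp only [decide_eq_true_eq, hr]
          rcases hz with hz | hz | hz | hz | hz
          · have := h1 _ ‹_›; omega
          · have := h2 _ ‹_›; omega
          · have := h3 _ ‹_›; omega
          · have := h4 _ ‹_›; omega
          · have := h5 _ ‹_›; omega
      rw [hins, show (B0) ++ m :: (B1 ++ (B2 ++ (B3 ++ (B4 ++ (B5))))) =
        (B0 ++ [m]) ++ B1 ++ B2 ++ B3 ++ B4 ++ B5 from by simp [List.append_assoc],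
        ih (B0 ++ [m]) B1 B2 B3 B4 B5 (pvMemSnoc h0 hr) h1 h2 h3 h4 h5]
      simp [hr, List.append_assoc]
    · have hins : PySem.List.insertBy (fun a b => decide (pvRank a < pvRank b)) m
          (B0 ++ B1 ++ B2 ++ B3 ++ B4 ++ B5) = (B0 ++ B1) ++ m :: (B2 ++ (B3 ++ (B4 ++ (B5)))) := by
        rw [show B0 ++ B1 ++ B2 ++ B3 ++ B4 ++ B5 = (B0 ++ B1) ++ (B2 ++ (B3 ++ (B4 ++ (B5)))) from by simp [List.append_assoc]]
        refine pvInsertMid _ m _ _ (fun y hy => ?_) (fun z hz => ?_)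
        · simp only [List.mem_append] at hy
          simp only [decide_eq_false_iff_not, not_lt, hr]
          rcases hy with hy | hy
          · have := h0 _ ‹_›; omega
          · have := h1 _ ‹_›; omega
        · simp only [List.mem_append] at hz
          simp only [decide_eq_true_eq, hr]
          rcases hz with hz | hz | hz | hz
          · have := h2 _ ‹_›; omega
          · have := h3 _ ‹_›; omega
          · have := h4 _ ‹_›; omega
          · have := h5 _ ‹_›; omega
      rw [hins, show (B0 ++ B1) ++ m :: (B2 ++ (B3 ++ (B4 ++ (B5)))) =
        B0 ++ (B1 ++ [m]) ++ B2 ++ B3 ++ B4 ++ B5 from by simp [List.append_assoc],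
        ih B0 (B1 ++ [m]) B2 B3 B4 B5 h0 (pvMemSnoc h1 hr) h2 h3 h4 h5]
      simp [hr, List.append_assoc]
    · have hins : PySem.List.insertBy (fun a b => decide (pvRank a < pvRank b)) m
          (B0 ++ B1 ++ B2 ++ B3 ++ B4 ++ B5) = (B0 ++ B1 ++ B2) ++ m :: (B3 ++ (B4 ++ (B5))) := by
        rw [show B0 ++ B1 ++ B2 ++ B3 ++ B4 ++ B5 = (B0 ++ B1 ++ B2) ++ (B3 ++ (B4 ++ (B5))) from by simp [List.append_assoc]]
        refine pvInsertMid _ m _ _ (fun y hy => ?_) (fun z hz => ?_)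
        · simp only [List.mem_append] at hy
          simp only [decide_eq_false_iff_not, not_lt, hr]
          rcases hy with (hy | hy) | hy
          · have := h0 _ ‹_›; omega
          · have := h1 _ ‹_›; omega
          · have := h2 _ ‹_›; omega
        · simp only [List.mem_append] at hz
          simp only [decide_eq_true_eq, hr]
          rcases hz with hz | hz | hz
          · have := h3 _ ‹_›; omega
          · have := h4 _ ‹_›; omega
          · have := h5 _ ‹_›; omega
      rw [hins, show (B0 ++ B1 ++ B2) ++ m :: (B3 ++ (B4 ++ (B5))) =
        B0 ++ B1 ++ (B2 ++ [m]) ++ B3 ++ B4 ++ B5 from by simp [List.append_assoc],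
        ih B0 B1 (B2 ++ [m]) B3 B4 B5 h0 h1 (pvMemSnoc h2 hr) h3 h4 h5]
      simp [hr, List.append_assoc]
    · have hins : PySem.List.insertBy (fun a b => decide (pvRank a < pvRank b)) m
          (B0 ++ B1 ++ B2 ++ B3 ++ B4 ++ B5) = (B0 ++ B1 ++ B2 ++ B3) ++ m :: (B4 ++ (B5)) := by
        rw [show B0 ++ B1 ++ B2 ++ B3 ++ B4 ++ B5 = (B0 ++ B1 ++ B2 ++ B3) ++ (B4 ++ (B5)) from by simp [List.append_assoc]]
        refine pvInsertMid _ m _ _ (fun y hy => ?_) (fun z hz => ?_)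
        · simp only [List.mem_append] at hy
          simp only [decide_eq_false_iff_not, not_lt, hr]
          rcases hy with ((hy | hy) | hy) | hy
          · have := h0 _ ‹_›; omega
          · have := h1 _ ‹_›; omega
          · have := h2 _ ‹_›; omega
          · have := h3 _ ‹_›; omega
        · simp only [List.mem_append] at hz
          simp only [decide_eq_true_eq, hr]
          rcases hz with hz | hz
          · have := h4 _ ‹_›; omega
          · have := h5 _ ‹_›; omega
      rw [hins, show (B0 ++ B1 ++ B2 ++ B3) ++ m :: (B4 ++ (B5)) =
        B0 ++ B1 ++ B2 ++ (B3 ++ [m]) ++ B4 ++ B5 from by simp [List.append_assoc],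
        ih B0 B1 B2 (B3 ++ [m]) B4 B5 h0 h1 h2 (pvMemSnoc h3 hr) h4 h5]
      simp [hr, List.append_assoc]
    · have hins : PySem.List.insertBy (fun a b => decide (pvRank a < pvRank b)) m
          (B0 ++ B1 ++ B2 ++ B3 ++ B4 ++ B5) = (B0 ++ B1 ++ B2 ++ B3 ++ B4) ++ m :: (B5) := by
        rw [show B0 ++ B1 ++ B2 ++ B3 ++ B4 ++ B5 = (B0 ++ B1 ++ B2 ++ B3 ++ B4) ++ (B5) from by simp [List.append_assoc]]
        refine pvInsertMid _ m _ _ (fun y hy => ?_) (fun z hz => ?_)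
        · simp only [List.mem_append] at hy
          simp only [decide_eq_false_iff_not, not_lt, hr]
          rcases hy with (((hy | hy) | hy) | hy) | hy
          · have := h0 _ ‹_›; omega
          · have := h1 _ ‹_›; omega
          · have := h2 _ ‹_›; omega
          · have := h3 _ ‹_›; omega
          · have := h4 _ ‹_›; omega
        · simp only [decide_eq_true_eq, hr]
          have := h5 _ hz; omega
      rw [hins, show (B0 ++ B1 ++ B2 ++ B3 ++ B4) ++ m :: (B5) =
        B0 ++ B1 ++ B2 ++ B3 ++ (B4 ++ [m]) ++ B5 from by simp [List.append_assoc],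
        ih B0 B1 B2 B3 (B4 ++ [m]) B5 h0 h1 h2 h3 (pvMemSnoc h4 hr) h5]
      simp [hr, List.append_assoc]
    · have hins : PySem.List.insertBy (fun a b => decide (pvRank a < pvRank b)) m
          (B0 ++ B1 ++ B2 ++ B3 ++ B4 ++ B5) = (B0 ++ B1 ++ B2 ++ B3 ++ B4 ++ B5) ++ [m] := by
        refine PySem.List.insertBy_of_forall_not_before _ m _ (fun y hy => ?_)
        simp only [List.mem_append] at hy
        simp only [decide_eq_false_iff_not, not_lt, hr]
        rcases hy with ((((hy | hy) | hy) | hy) | hy) | hy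
        · have := h0 _ ‹_›; omega
        · have := h1 _ ‹_›; omega
        · have := h2 _ ‹_›; omega
        · have := h3 _ ‹_›; omega
        · have := h4 _ ‹_›; omega
        · have := h5 _ ‹_›; omega
      rw [hins, show (B0 ++ B1 ++ B2 ++ B3 ++ B4 ++ B5) ++ [m] =
        B0 ++ B1 ++ B2 ++ B3 ++ B4 ++ (B5 ++ [m]) from by simp [List.append_assoc],
        ih B0 B1 B2 B3 B4 (B5 ++ [m]) h0 h1 h2 h3 h4 (pvMemSnoc h5 hr)]
      simp [hr, List.append_assoc]

theorem pvA_buckets (ms : List (List (String × String))) :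
    enforce_mapping_structure ms =
      pvBucket 0 ms ++ pvBucket 1 ms ++ pvBucket 2 ms ++ pvBucket 3 ms ++ pvBucket 4 ms ++ pvBucket 5 ms := by
  simp [enforce_mapping_structure, pvFoldA ms ⟨[], [], [], [], [], []⟩, List.append_assoc]

theorem pvB_buckets (ms : List (List (String × String))) :
    enforce_mapping_structure_alt ms =
      pvBucket 0 ms ++ pvBucket 1 ms ++ pvBucket 2 ms ++ pvBucket 3 ms ++ pvBucket 4 ms ++ pvBucket 5 ms := by
  rw [enforce_mapping_structure_alt, PySem.List.sorted_eq_foldl_insertBy]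
  have := pvFoldB ms [] [] [] [] [] [] (by simp) (by simp) (by simp) (by simp) (by simp) (by simp)
  simpa using this

-- ===== VERDICT (by name: the statement is the Claim_ definition above) =====
theorem enforce_mapping_structure_spec : Claim_equal_enforce_mapping_structure := by
  intro ms _ _
  unfold Spec_enforce_mapping_structure
  rw [pvA_buckets, pvB_buckets]
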